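-- pv_equiv track=rewrite | github.com/ianlintner/python_dsa | src/interview_workbook/leetcode/arrays_hashing/encode_and_decode_strings.py | decodeAlternative
-- ===== SOURCE A (Python) =====
-- from typing import List
--
-- def decodeAlternative(s: str) -> List[str]:
--     """
--     Alternative decoding using escape characters.
--
--     Time Complexity: O(n)
--     Space Complexity: O(n)
--     """
--     result = []
--     i = 0
--     start = 0
--
--     while i < len(s):
--         if s[i] == ":":
--             # Found end of string
--             string = s[start:i]
--             # Unescape: replace "/:" with ":" and "//" with "/"
--             string = string.replace("/:", ":").replace("//", "/")
--             result.append(string)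
--             i += 1
--             start = i
--         elif s[i] == "/" and i + 1 < len(s) and s[i + 1] in ["/", ":"]:
--             # Skip escape sequence
--             i += 2
--         else:
--             i += 1
--
--     return result
-- ===== SOURCE B (Python) =====
-- # B: single-pass character state machine with an explicit buffer (no slicing/replace).
-- def decodeAlternative(s):
--     result = []
--     buf = []
--     i = 0
--     n = len(s)
--     while i < n:
--         c = s[i]
--         if c == "/" and i + 1 < n and s[i + 1] in ("/", ":"):
--             buf.append(s[i + 1])
--             i += 2
--         elif c == ":":
--             result.append("".join(buf))
--             buf = []
--             i += 1
--         else: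
--             buf.append(c)
--             i += 1
--     return result
-- ===== Notes on version B (the rewrite author's own statement) =====
-- stated objective: alternative
-- what changed: B decodes in a single character-level pass with an explicit buffer (escape pairs handled in place), instead of A's scan that slices out each segment and unescapes it with two global str.replace passes.
import Mathlib
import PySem

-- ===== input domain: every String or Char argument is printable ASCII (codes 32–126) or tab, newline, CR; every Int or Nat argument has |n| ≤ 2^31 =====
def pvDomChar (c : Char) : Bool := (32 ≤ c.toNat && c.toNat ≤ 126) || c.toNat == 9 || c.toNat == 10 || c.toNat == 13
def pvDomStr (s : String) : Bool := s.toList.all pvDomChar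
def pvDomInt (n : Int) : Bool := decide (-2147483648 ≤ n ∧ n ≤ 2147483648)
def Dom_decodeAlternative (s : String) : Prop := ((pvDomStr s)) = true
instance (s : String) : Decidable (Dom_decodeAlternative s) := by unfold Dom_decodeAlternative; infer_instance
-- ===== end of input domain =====

-- B replaces A's slice-then-double-replace decoding by a single character-level state
-- machine with an explicit buffer; same return value, an alternative decomposition.

-- ===== PORT A =====
-- A's while loop over indices i/start; slices and the two-stage replace are ported
-- with PySem.List.slice and PySem.Chars.replace (Python-exact).
def decodeA_loop (cs : List Char) (i start : Nat) (result : List String) : List String :=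
  if h : i < cs.length then
    if cs[i] = ':' then
      -- string = s[start:i]; then the two replaces; then result.append(string)
      decodeA_loop cs (i + 1) (i + 1)
        (result ++ [String.ofList (PySem.Chars.replace
          (PySem.Chars.replace (PySem.List.slice cs (some (start : Int)) (some (i : Int)))
            ['/', ':'] [':']) ['/', '/'] ['/'])])
    else if cs[i] = '/' ∧ (cs[i+1]? = some '/' ∨ cs[i+1]? = some ':') then
      decodeA_loop cs (i + 2) start result
    else
      decodeA_loop cs (i + 1) start result
  else result
termination_by cs.length - i

def decodeAlternative (s : String) : List String :=
  decodeA_loop s.toList 0 0 []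

-- ===== PORT B =====
def decodeB_loop : List Char → List Char → List String → List String
  | [], _, res => res
  | c :: rest, buf, res =>
    if c = '/' then
      match rest with
      | d :: rest' =>
        if d = '/' ∨ d = ':' then decodeB_loop rest' (buf ++ [d]) res
        else decodeB_loop (d :: rest') (buf ++ [c]) res
      | [] => decodeB_loop [] (buf ++ [c]) res
    else if c = ':' then decodeB_loop rest [] (res ++ [String.ofList buf])
    else decodeB_loop rest (buf ++ [c]) res
termination_by cs _ _ => cs.length
decreasing_by all_goals (simp only [List.length_cons]; omega)

def decodeAlternative_alt (s : String) : List String :=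
  decodeB_loop s.toList [] []

-- ===== PRECONDITION & SPEC =====
def Spec_decodeAlternative (s : String) (out : List String) : Prop := out = decodeAlternative_alt s
instance (s : String) (out : List String) : Decidable (Spec_decodeAlternative s out) := by unfold Spec_decodeAlternative; infer_instance

-- ===== CLAIM (what is proved, stated in full; the proofs are below) =====
def Claim_equal_decodeAlternative : Prop := ∀ (s : String), Dom_decodeAlternative s → Spec_decodeAlternative s (decodeAlternative s)

-- ===== LEMMAS AND PROOFS =====

-- Tokens of the pending (not yet terminated) segment as A's scanner walks it:
-- an escape pair "/x" (x ∈ {'/',':'}) or a single raw character.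
inductive Tok where
  | esc : Char → Tok
  | raw : Char → Tok

def Tok.flat : Tok → List Char
  | .esc x => ['/', x]
  | .raw c => [c]

def Tok.dec : Tok → List Char
  | .esc x => [x]
  | .raw c => [c]

def flatT : List Tok → List Char
  | [] => []
  | t :: T => t.flat ++ flatT T

def decT : List Tok → List Char
  | [] => []
  | t :: T => t.dec ++ decT T

-- after a lone raw '/', the next token (if any) is a raw non-special character
def nextOk : List Tok → Prop
  | [] => True
  | .raw d :: _ => d ≠ '/' ∧ d ≠ ':'
  | .esc _ :: _ => False

def Valid : List Tok → Prop
  | [] => True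
  | .esc x :: T => (x = '/' ∨ x = ':') ∧ Valid T
  | .raw c :: T => c ≠ ':' ∧ (c = '/' → nextOk T) ∧ Valid T

def endsRS (T : List Tok) : Prop := T.getLast? = some (.raw '/')

-- one leftmost-nonoverlapping pass replacing the two-char pattern [p1,p2] by [r]
def repl2 (p1 p2 r : Char) : List Char → List Char
  | [] => []
  | [c] => [c]
  | c :: d :: t =>
    if c = p1 ∧ d = p2 then r :: repl2 p1 p2 r t
    else c :: repl2 p1 p2 r (d :: t)

lemma repl2_pair (p1 p2 r : Char) (l : List Char) :
    repl2 p1 p2 r (p1 :: p2 :: l) = r :: repl2 p1 p2 r l := by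
  simp [repl2]

lemma repl2_cons (p1 p2 r c : Char) (l : List Char)
    (h : c ≠ p1 ∨ ∀ d, l.head? = some d → d ≠ p2) :
    repl2 p1 p2 r (c :: l) = c :: repl2 p1 p2 r l := by
  match l with
  | [] => simp [repl2]
  | d :: t =>
    have hne : ¬ (c = p1 ∧ d = p2) := by
      rcases h with h | h
      · exact fun hh => h hh.1
      · exact fun hh => h d rfl hh.2
    simp [repl2, hne]

lemma go_eq (p1 p2 r : Char) : ∀ (fuel : Nat) (l acc : List Char), l.length ≤ fuel →
    PySem.Chars.replace.go [p1, p2] [r] fuel l acc = acc.reverse ++ repl2 p1 p2 r l := by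
  intro fuel
  induction fuel with
  | zero =>
    intro l acc h
    have : l = [] := by
      cases l with
      | nil => rfl
      | cons a t => simp at h
    subst this
    simp [PySem.Chars.replace.go, repl2]
  | succ f ih =>
    intro l acc h
    match l with
    | [] => simp [PySem.Chars.replace.go, repl2]
    | [c] =>
      have hp : [p1, p2].isPrefixOf [c] = false := by
        simp [List.isPrefixOf]
      rw [PySem.Chars.replace.go]
      simp only [hp, Bool.false_eq_true, if_false]
      rw [ih [] (c :: acc) (by simp)]
      simp [repl2]
    | c :: d :: t =>
      by_cases hcd : c = p1 ∧ d = p2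
      · obtain ⟨h1, h2⟩ := hcd
        subst h1; subst h2
        have hp : [c, d].isPrefixOf (c :: d :: t) = true := by
          simp [List.isPrefixOf]
        rw [PySem.Chars.replace.go]
        simp only [hp, if_true]
        rw [ih _ _ (by simp at h ⊢; omega)]
        simp [repl2_pair]
      · have hp : [p1, p2].isPrefixOf (c :: d :: t) = false := by
          simp [List.isPrefixOf]
          intro h1 h2
          exact hcd ⟨h1.symm, h2.symm⟩
        rw [PySem.Chars.replace.go]
        simp only [hp, Bool.false_eq_true, if_false]
        rw [ih (d :: t) (c :: acc) (by simp at h ⊢; omega)]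
        simp [repl2, hcd]

lemma replace_eq_repl2 (p1 p2 r : Char) (l : List Char) :
    PySem.Chars.replace l [p1, p2] [r] = repl2 p1 p2 r l := by
  rw [PySem.Chars.replace]
  simp only [List.isEmpty_cons, Bool.false_eq_true, if_false]
  rw [go_eq p1 p2 r l.length l [] (le_refl _)]
  simp

def Tok.mid : Tok → List Char
  | .esc x => if x = ':' then [':'] else ['/', x]
  | .raw c => [c]

def flatF : List Tok → List Char
  | [] => []
  | t :: T => t.mid ++ flatF T

lemma head_flatT_ne_colon (T : List Tok) (hV : Valid T) :
    ∀ d, (flatT T).head? = some d → d ≠ ':' := by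
  cases T with
  | nil => intro d hd; simp [flatT] at hd
  | cons t T =>
    cases t with
    | esc x =>
      intro d hd
      simp [flatT, Tok.flat] at hd
      rw [← hd]; decide
    | raw c =>
      intro d hd
      simp [flatT, Tok.flat] at hd
      rw [← hd]
      exact hV.1

lemma lemF (T : List Tok) (hV : Valid T) : repl2 '/' ':' ':' (flatT T) = flatF T := by
  induction T with
  | nil => simp [flatT, flatF, repl2]
  | cons t T ih =>
    cases t with
    | esc x =>
      obtain ⟨hx, hVT⟩ := hV
      rcases hx with hx | hx <;> subst hx
      · -- esc '/' : "//" ++ w, no match at either slash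
        have h2 : repl2 '/' ':' ':' ('/' :: flatT T) = '/' :: repl2 '/' ':' ':' (flatT T) := by
          apply repl2_cons
          right; exact head_flatT_ne_colon T hVT
        have h1 : repl2 '/' ':' ':' ('/' :: '/' :: flatT T)
            = '/' :: repl2 '/' ':' ':' ('/' :: flatT T) := by
          apply repl2_cons
          right; intro d hd
          simp at hd; rw [← hd]; decide
        simp only [flatT, Tok.flat, List.cons_append, List.nil_append, flatF, Tok.mid]
        rw [h1, h2, ih hVT]
        simp
      · -- esc ':' : "/:" ++ w, matched pair
        simp only [flatT, Tok.flat, List.cons_append, List.nil_append, flatF, Tok.mid]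
        rw [repl2_pair, ih hVT]
        simp
    | raw c =>
      obtain ⟨hc, _, hVT⟩ := hV
      have h1 : repl2 '/' ':' ':' (c :: flatT T) = c :: repl2 '/' ':' ':' (flatT T) := by
        apply repl2_cons
        right; exact head_flatT_ne_colon T hVT
      simp only [flatT, Tok.flat, List.cons_append, List.nil_append, flatF, Tok.mid]
      rw [h1, ih hVT]

lemma lemG (T : List Tok) (hV : Valid T) : repl2 '/' '/' '/' (flatF T) = decT T := by
  induction T with
  | nil => simp [flatF, decT, repl2]
  | cons t T ih =>
    cases t with
    | esc x =>
      obtain ⟨hx, hVT⟩ := hV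
      rcases hx with hx | hx <;> subst hx
      · -- esc '/' → "//" : matched pair
        simp only [flatF, Tok.mid, if_neg (by decide : ¬ ('/' : Char) = ':'),
          List.cons_append, List.nil_append, decT, Tok.dec]
        rw [repl2_pair, ih hVT]
      · -- esc ':' → ":" : single non-'/' char
        have h1 : repl2 '/' '/' '/' (':' :: flatF T) = ':' :: repl2 '/' '/' '/' (flatF T) := by
          apply repl2_cons
          left; decide
        simp only [flatF, Tok.mid, if_true, List.cons_append, List.nil_append, decT, Tok.dec]
        rw [h1, ih hVT]
    | raw c =>
      obtain ⟨hc, hslash, hVT⟩ := hV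
      have h1 : repl2 '/' '/' '/' (c :: flatF T) = c :: repl2 '/' '/' '/' (flatF T) := by
        apply repl2_cons
        by_cases hcs : c = '/'
        · right
          intro d hd
          have hnext := hslash hcs
          cases T with
          | nil => simp [flatF] at hd
          | cons t' T' =>
            cases t' with
            | esc y => exact absurd hnext (by simp [nextOk])
            | raw e =>
              simp [flatF, Tok.mid] at hd
              rw [← hd]
              exact hnext.1
        · left; exact hcs
      simp only [flatF, Tok.mid, List.cons_append, List.nil_append, decT, Tok.dec]
      rw [h1, ih hVT]

lemma decode_pending (T : List Tok) (hV : Valid T) :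
    PySem.Chars.replace (PySem.Chars.replace (flatT T) ['/', ':'] [':']) ['/', '/'] ['/'] = decT T := by
  rw [replace_eq_repl2 '/' ':' ':', lemF T hV, replace_eq_repl2, lemG T hV]

lemma endsRS_cons_cons (t t' : Tok) (T : List Tok) :
    endsRS (t :: t' :: T) ↔ endsRS (t' :: T) := by
  simp [endsRS]

lemma valid_snoc_esc (T : List Tok) (x : Char) (hV : Valid T) (hx : x = '/' ∨ x = ':')
    (hL : ¬ endsRS T) : Valid (T ++ [.esc x]) := by
  induction T with
  | nil => exact ⟨hx, trivial⟩
  | cons t T ih =>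
    cases t with
    | esc y =>
      obtain ⟨hy, hVT⟩ := hV
      cases T with
      | nil => exact ⟨hy, hx, trivial⟩
      | cons t' T' =>
        exact ⟨hy, ih hVT (fun h => hL ((endsRS_cons_cons _ _ _).mpr h))⟩
    | raw c =>
      obtain ⟨hc, hsl, hVT⟩ := hV
      cases T with
      | nil =>
        refine ⟨hc, fun hcs => ?_, hx, trivial⟩
        exact absurd (by simp [endsRS, hcs] : endsRS [Tok.raw c]) hL
      | cons t' T' =>
        refine ⟨hc, fun hcs => ?_, ih hVT (fun h => hL ((endsRS_cons_cons _ _ _).mpr h))⟩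
        have := hsl hcs
        cases t' with
        | esc y => exact absurd this (by simp [nextOk])
        | raw d => exact this

lemma valid_snoc_raw (T : List Tok) (c : Char) (hV : Valid T) (hc : c ≠ ':')
    (hL : endsRS T → (c ≠ '/' ∧ c ≠ ':')) : Valid (T ++ [.raw c]) := by
  induction T with
  | nil => exact ⟨hc, fun _ => trivial, trivial⟩
  | cons t T ih =>
    cases t with
    | esc y =>
      obtain ⟨hy, hVT⟩ := hV
      cases T with
      | nil => exact ⟨hy, hc, fun _ => trivial, trivial⟩
      | cons t' T' =>
        exact ⟨hy, ih hVT (fun h => hL ((endsRS_cons_cons _ _ _).mpr h))⟩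
    | raw e =>
      obtain ⟨he, hsl, hVT⟩ := hV
      cases T with
      | nil =>
        refine ⟨he, fun hes => ?_, hc, fun _ => trivial, trivial⟩
        have := hL (by simp [endsRS, hes])
        exact ⟨this.1, this.2⟩
      | cons t' T' =>
        refine ⟨he, fun hes => ?_, ih hVT (fun h => hL ((endsRS_cons_cons _ _ _).mpr h))⟩
        have := hsl hes
        cases t' with
        | esc y => exact absurd this (by simp [nextOk])
        | raw d => exact this

lemma flatT_concat (T : List Tok) (t : Tok) : flatT (T ++ [t]) = flatT T ++ t.flat := by
  induction T with
  | nil => simp [flatT]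
  | cons s T ih => simp [flatT, ih]

lemma decT_concat (T : List Tok) (t : Tok) : decT (T ++ [t]) = decT T ++ t.dec := by
  induction T with
  | nil => simp [decT]
  | cons s T ih => simp [decT, ih]

lemma slice_snoc (cs : List Char) (start i : Nat) (h1 : start ≤ i) (h2 : i < cs.length) :
    PySem.List.slice cs (some (start : Int)) (some ((i + 1 : Nat) : Int))
      = PySem.List.slice cs (some (start : Int)) (some (i : Int)) ++ [cs[i]] := by
  rw [PySem.List.slice_natCast, PySem.List.slice_natCast]
  rw [show i + 1 - start = (i - start) + 1 from by omega, List.take_add_one]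
  congr 1
  rw [List.getElem?_drop, show start + (i - start) = i from by omega,
    List.getElem?_eq_getElem h2]
  rfl

lemma sim (cs : List Char) : ∀ (k i start : Nat) (res : List String) (T : List Tok),
    cs.length - i ≤ k → start ≤ i → i ≤ cs.length →
    PySem.List.slice cs (some (start : Int)) (some (i : Int)) = flatT T →
    Valid T →
    (endsRS T → ∀ d, (cs.drop i).head? = some d → d ≠ '/' ∧ d ≠ ':') →
    decodeA_loop cs i start res = decodeB_loop (cs.drop i) (decT T) res := by
  intro k
  induction k with
  | zero =>
    intro i start res T hk hsi hil hsl hV hcomp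
    have h0 : cs.drop i = [] := List.drop_eq_nil_of_le (by omega)
    rw [decodeA_loop, h0]
    simp [show ¬ i < cs.length from by omega, decodeB_loop]
  | succ k ih =>
    intro i start res T hk hsi hil hsl hV hcomp
    by_cases hi : i < cs.length
    · have hdrop := List.drop_eq_getElem_cons hi
      by_cases hc : cs[i] = ':'
      · -- terminator: flush
        rw [decodeA_loop, dif_pos hi, if_pos hc, hsl, decode_pending T hV]
        rw [hdrop]
        rw [decodeB_loop.eq_def]
        simp only [if_neg (show ¬ cs[i] = '/' from by rw [hc]; decide), if_pos hc]
        exact ih (i + 1) (i + 1) (res ++ [String.ofList (decT T)]) []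
          (by omega) (le_refl _) (by omega)
          (by rw [PySem.List.slice_natCast]; simp [flatT])
          trivial
          (by intro h; simp [endsRS] at h)
      · by_cases he : cs[i] = '/' ∧ (cs[i+1]? = some '/' ∨ cs[i+1]? = some ':')
        · -- escape pair
          obtain ⟨hc2, hx⟩ := he
          have hi1 : i + 1 < cs.length := by
            rcases hx with hx | hx <;> exact (List.getElem?_eq_some_iff.mp hx).1
          have hx' : cs[i+1] = '/' ∨ cs[i+1] = ':' := by
            rcases hx with hx | hx
            · left; rw [List.getElem?_eq_getElem hi1] at hx; exact Option.some.inj hx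
            · right; rw [List.getElem?_eq_getElem hi1] at hx; exact Option.some.inj hx
          have hnE : ¬ endsRS T := by
            intro hE
            exact ((hcomp hE cs[i] (by rw [hdrop]; rfl)).1) hc2
          rw [decodeA_loop, dif_pos hi, if_neg hc, if_pos (And.intro hc2 hx)]
          rw [hdrop, List.drop_eq_getElem_cons hi1]
          rw [decodeB_loop.eq_def]
          simp only [if_pos hc2, if_pos hx']
          rw [show decT T ++ [cs[i+1]] = decT (T ++ [.esc cs[i+1]]) from by
            rw [decT_concat]; rfl]
          exact ih (i + 2) start res (T ++ [.esc cs[i+1]])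
            (by omega) (by omega) (by omega)
            (by rw [show i + 2 = (i + 1) + 1 from rfl, slice_snoc cs start (i+1) (by omega) hi1,
                  slice_snoc cs start i hsi hi, hsl, flatT_concat, hc2]
                simp [Tok.flat])
            (valid_snoc_esc T cs[i+1] hV hx' hnE)
            (by intro hE; exact absurd hE (by simp [endsRS]))
        · -- ordinary character
          rw [decodeA_loop, dif_pos hi, if_neg hc, if_neg he]
          have hsl' : PySem.List.slice cs (some (start : Int)) (some ((i + 1 : Nat) : Int))
              = flatT (T ++ [.raw cs[i]]) := by
            rw [slice_snoc cs start i hsi hi, hsl, flatT_concat]; rfl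
          have hVraw : Valid (T ++ [.raw cs[i]]) := by
            apply valid_snoc_raw T cs[i] hV hc
            intro hE
            exact hcomp hE cs[i] (by rw [hdrop]; rfl)
          have hcomp' : endsRS (T ++ [.raw cs[i]]) →
              ∀ d, (cs.drop (i+1)).head? = some d → d ≠ '/' ∧ d ≠ ':' := by
            intro hE d hd
            have hcs : cs[i] = '/' := by
              simpa [endsRS, List.getLast?_concat] using hE
            have hd' : cs[i+1]? = some d := by rw [← List.head?_drop]; exact hd
            constructor
            · intro hdd; exact he ⟨hcs, Or.inl (by rw [hd', hdd])⟩
            · intro hdd; exact he ⟨hcs, Or.inr (by rw [hd', hdd])⟩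
          have hrec := ih (i + 1) start res (T ++ [.raw cs[i]])
            (by omega) (by omega) (by omega) hsl' hVraw hcomp'
          rw [hrec, decT_concat]
          by_cases hcs : cs[i] = '/'
          · rw [hdrop]
            cases hd1 : cs.drop (i+1) with
            | nil =>
              conv_rhs => rw [decodeB_loop.eq_def]
              simp [hcs, Tok.dec]
            | cons d rest' =>
              have hd' : cs[i+1]? = some d := by
                rw [← List.head?_drop, hd1]; rfl
              have hdne : ¬ (d = '/' ∨ d = ':') := by
                rintro (h | h)
                · exact he ⟨hcs, Or.inl (h ▸ hd')⟩
                · exact he ⟨hcs, Or.inr (h ▸ hd')⟩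
              conv_rhs => rw [decodeB_loop.eq_def]
              simp [hcs, hdne, Tok.dec]
          · rw [hdrop]
            conv_rhs => rw [decodeB_loop.eq_def]
            simp [hcs, hc, Tok.dec]
    · have h0 : cs.drop i = [] := List.drop_eq_nil_of_le (by omega)
      rw [decodeA_loop, h0]
      simp [hi, decodeB_loop]

-- ===== VERDICT (by name: the statement is the Claim_ definition above) =====
theorem decodeAlternative_spec : Claim_equal_decodeAlternative := by
  intro s _
  unfold Spec_decodeAlternative decodeAlternative decodeAlternative_alt
  have h := sim s.toList s.toList.length 0 0 [] [] (by omega) (by omega) (by omega)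
      (by simp [PySem.List.slice_to, flatT]) (by trivial)
      (by intro hE; simp [endsRS] at hE)
  simpa [decT] using h
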